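-- pv_equiv track=rewrite | github.com/iman-noroozi/sitebuilder | quantum_resistant_security.py | _polynomial_multiply
-- ===== SOURCE A (Python) =====
-- from typing import Dict, List, Optional, Any, Tuple, Union
--
-- def _polynomial_multiply(poly1: List[int], poly2: List[int], modulus: int) -> List[int]:
--     """Multiply two polynomials modulo modulus"""
--     n = len(poly1)
--     result = [0] * n
--
--     for i in range(n):
--         for j in range(n):
--             k = (i + j) % n
--             result[k] = (result[k] + poly1[i] * poly2[j]) % modulus
--
--     return result
-- ===== SOURCE B (Python) =====
-- from typing import List
--
-- def _polynomial_multiply(poly1: List[int], poly2: List[int], modulus: int) -> List[int]: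
--     """Cyclic polynomial multiplication mod modulus via Kronecker substitution:
--     reduce coefficients mod |modulus|, pack each polynomial into one big integer
--     (base > any convolution coefficient), multiply once with Python's big-int
--     multiplication, decode the digits (= the linear convolution), wrap around
--     cyclically and reduce mod modulus."""
--     n = len(poly1)
--     if n == 0:
--         return []
--     M = abs(modulus)
--     r1 = [poly1[i] % M for i in range(n)]
--     r2 = [poly2[j] % M for j in range(n)]
--     base = n * (M - 1) * (M - 1) + 1
--     x1 = 0
--     for c in reversed(r1):
--         x1 = x1 * base + c
--     x2 = 0
--     for c in reversed(r2):
--         x2 = x2 * base + c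
--     prod = x1 * x2
--     conv = []
--     for _ in range(2 * n - 1):
--         prod, d = divmod(prod, base)
--         conv.append(d)
--     out = []
--     for k in range(n):
--         s = conv[k] + (conv[k + n] if k + n < 2 * n - 1 else 0)
--         out.append(s % modulus)
--     return out
-- ===== Notes on version B (the rewrite author's own statement) =====
-- stated objective: faster
-- what changed: A runs n^2 interpreted multiply-add-mod steps over a mutable result array; B uses Kronecker substitution: it reduces the coefficients mod |modulus|, packs each polynomial into a single big integer, performs ONE native big-int multiplication, decodes the base digits (the exact linear convolution), then wraps cyclically and reduces mod modulus.
import Mathlib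
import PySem

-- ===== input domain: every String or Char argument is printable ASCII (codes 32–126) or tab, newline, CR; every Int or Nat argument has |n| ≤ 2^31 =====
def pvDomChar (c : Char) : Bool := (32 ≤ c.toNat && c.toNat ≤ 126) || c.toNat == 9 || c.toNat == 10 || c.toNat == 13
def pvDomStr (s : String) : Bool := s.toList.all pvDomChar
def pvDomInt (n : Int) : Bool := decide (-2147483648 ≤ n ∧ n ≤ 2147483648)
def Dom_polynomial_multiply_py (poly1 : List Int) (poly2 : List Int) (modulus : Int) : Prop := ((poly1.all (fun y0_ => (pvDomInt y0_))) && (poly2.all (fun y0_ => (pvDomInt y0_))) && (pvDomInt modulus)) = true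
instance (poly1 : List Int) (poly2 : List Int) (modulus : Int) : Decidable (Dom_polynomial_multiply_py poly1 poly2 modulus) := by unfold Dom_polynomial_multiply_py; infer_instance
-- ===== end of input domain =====

-- B replaces A's n^2 scatter loops by Kronecker substitution: reduce coefficients mod |modulus|,
-- pack each polynomial into one big integer, multiply once, decode the digits, wrap, reduce.

-- ===== PORT A =====
-- literal transliteration of A: result list updated in place over nested index loops
def polynomial_multiply_py (poly1 : List Int) (poly2 : List Int) (modulus : Int) : List Int :=
  let n := poly1.length
  let result := List.replicate n (0 : Int)
  (PySem.List.pyRange 0 (n : Int) 1).foldl (fun result i =>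
    (PySem.List.pyRange 0 (n : Int) 1).foldl (fun result j =>
      let k := PySem.Int.mod (i + j) (n : Int)
      result.set k.toNat
        (PySem.Int.mod
          (PySem.List.pyGetD result k 0 +
            PySem.List.pyGetD poly1 i 0 * PySem.List.pyGetD poly2 j 0) modulus))
      result) result

-- ===== PORT B =====
-- literal transliteration of B (Kronecker substitution): reduce mod |m|, pack via Horner,
-- one big-int multiply, decode 2n-1 digits by divmod, wrap cyclically, reduce mod m
def polynomial_multiply_py_alt (poly1 : List Int) (poly2 : List Int) (modulus : Int) : List Int :=
  let n := poly1.length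
  if n = 0 then [] else
  let M := |modulus|
  let r1 := (PySem.List.pyRange 0 (n : Int) 1).map (fun i => PySem.Int.mod (PySem.List.pyGetD poly1 i 0) M)
  let r2 := (PySem.List.pyRange 0 (n : Int) 1).map (fun j => PySem.Int.mod (PySem.List.pyGetD poly2 j 0) M)
  let base := (n : Int) * (M - 1) * (M - 1) + 1
  let x1 := r1.reverse.foldl (fun x c => x * base + c) 0
  let x2 := r2.reverse.foldl (fun x c => x * base + c) 0
  let prod := x1 * x2
  let st := (PySem.List.pyRange 0 (2 * (n : Int) - 1) 1).foldl
      (fun (st : Int × List Int) _ =>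
        (PySem.Int.floordiv st.1 base, st.2 ++ [PySem.Int.mod st.1 base])) (prod, [])
  let conv := st.2
  (PySem.List.pyRange 0 (n : Int) 1).map (fun k =>
    PySem.Int.mod
      (PySem.List.pyGetD conv k 0 +
        (if k + (n : Int) < 2 * (n : Int) - 1 then PySem.List.pyGetD conv (k + (n : Int)) 0 else 0))
      modulus)

-- ===== PRECONDITION & SPEC =====
-- Pre_ excludes exactly the inputs where Python A raises: len(poly2) < len(poly1)
-- (IndexError on poly2[j]) and modulus = 0 with poly1 nonempty (ZeroDivisionError);
-- for poly1 = [] the loops never run, so A returns [] whatever modulus is.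
def Pre_polynomial_multiply_py (poly1 : List Int) (poly2 : List Int) (modulus : Int) : Prop :=
  poly1.length ≤ poly2.length ∧ (modulus ≠ 0 ∨ poly1 = [])
instance (poly1 : List Int) (poly2 : List Int) (modulus : Int) : Decidable (Pre_polynomial_multiply_py poly1 poly2 modulus) := by unfold Pre_polynomial_multiply_py; infer_instance

def pvWitness_polynomial_multiply_py : List Int × List Int × Int := ([1, 2, 3], [4, -5, 6], 7)

def Spec_polynomial_multiply_py (poly1 : List Int) (poly2 : List Int) (modulus : Int) (out : List Int) : Prop := out = polynomial_multiply_py_alt poly1 poly2 modulus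
instance (poly1 : List Int) (poly2 : List Int) (modulus : Int) (out : List Int) : Decidable (Spec_polynomial_multiply_py poly1 poly2 modulus out) := by unfold Spec_polynomial_multiply_py; infer_instance

-- ===== CLAIM (what is proved, stated in full; the proofs are below) =====
def Claim_equal_polynomial_multiply_py : Prop := ∀ (poly1 : List Int) (poly2 : List Int) (modulus : Int), Dom_polynomial_multiply_py poly1 poly2 modulus → Pre_polynomial_multiply_py poly1 poly2 modulus → Spec_polynomial_multiply_py poly1 poly2 modulus (polynomial_multiply_py poly1 poly2 modulus)

-- ===== LEMMAS AND PROOFS =====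

-- ---- generic arithmetic helpers ----
theorem pvFmodPos (a b : Int) (hb : 0 < b) : a.fmod b = a % b := by
  rw [Int.fmod_eq_emod]; simp [Int.le_of_lt hb]

theorem pvFdivPos (a b : Int) (hb : 0 < b) : a.fdiv b = a / b := by
  rw [Int.fdiv_eq_ediv]; simp [Int.le_of_lt hb]

-- reducing an already-reduced summand does not change the residue (fmod = Python %)
theorem pvFmodAddLeft (a b m : Int) : (a.fmod m + b).fmod m = (a + b).fmod m := by
  have h : a.fmod m + b = (a + b) + m * (-(a.fdiv m)) := by rw [Int.fmod_def]; ring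
  rw [h, Int.add_mul_fmod_self_left]

theorem pvFmodCongr (a b m : Int) (h : m ∣ (a - b)) : a.fmod m = b.fmod m := by
  obtain ⟨t, ht⟩ := h
  have : a = b + m * t := by omega
  rw [this, Int.add_mul_fmod_self_left]

-- ---- list/range helpers ----
theorem pvMapRangeGetD (n : Nat) (r : List Int) (h : r.length = n) :
    (List.range n).map (fun k => r.getD k 0) = r := by
  apply List.ext_getElem
  · simp [h]
  · intro i h1 h2
    simp only [List.getElem_map, List.getElem_range]
    rw [List.getD_eq_getElem r 0 (by simpa [h] using h1)]

theorem pvSetMapRange (n : Nat) (f : Nat → Int) (kt : Nat) (_hkt : kt < n) (v : Int) :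
    ((List.range n).map f).set kt v = (List.range n).map (fun k => if k = kt then v else f k) := by
  apply List.ext_getElem
  · simp
  · intro i h1 h2
    simp only [List.getElem_set, List.getElem_map, List.getElem_range]
    by_cases h : kt = i <;> simp [h, eq_comm]

theorem pvGetDMapRange (n : Nat) (f : Nat → Int) (k : Nat) (hk : k < n) :
    ((List.range n).map f).getD k 0 = f k := by
  rw [List.getD_eq_getElem _ 0 (by simpa using hk)]
  simp

theorem pvSumMapRange (n : Nat) (f : Nat → Int) :
    ((List.range n).map f).sum = ∑ i ∈ Finset.range n, f i := by
  induction n with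
  | zero => simp
  | succ n ih => rw [List.range_succ, List.map_append, List.sum_append, Finset.sum_range_succ, ih]; simp

-- ---- cyclic-index cancellation facts (A side) ----
theorem pvCancel1 (n i t : Nat) (hi : i < n) (ht : t < n) :
    ((i + t) % n + n - i) % n = t := by
  have h1 : (i + t) % n + n - i = (i + t) % n + (n - i) := by omega
  rw [h1, Nat.mod_add_mod]
  have h2 : i + t + (n - i) = t + n := by omega
  rw [h2, Nat.add_mod_right, Nat.mod_eq_of_lt ht]

theorem pvCancel0 (n i k : Nat) (hi : i < n) (hk : k < n) :
    (i + (k + n - i) % n) % n = k := by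
  rw [Nat.add_mod_mod]
  have h2 : i + (k + n - i) = k + n := by omega
  rw [h2, Nat.add_mod_right, Nat.mod_eq_of_lt hk]

theorem pvCancel2 (n i t k : Nat) (hi : i < n) (ht : t < n) (hk : k < n) :
    (k + n - i) % n = t ↔ k = (i + t) % n := by
  constructor
  · intro h
    have := pvCancel0 n i k hi hk
    rw [h] at this
    omega
  · intro h
    subst h
    exact pvCancel1 n i t hi ht

-- one row of A's scatter loop, characterised pointwise
theorem pvRowA (p1 p2 : Nat → Int) (m : Int) (n i : Nat) (hi : i < n)
    (r : List Int) (hr : r.length = n) :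
    ∀ t, t ≤ n →
    (List.range t).foldl (fun r j =>
        r.set ((i + j) % n) (((r.getD ((i + j) % n) 0 + p1 i * p2 j).fmod m))) r
      = (List.range n).map (fun k =>
          if (k + n - i) % n < t then (r.getD k 0 + p1 i * p2 ((k + n - i) % n)).fmod m
          else r.getD k 0) := by
  intro t
  induction t with
  | zero =>
    intro _
    simp only [List.range_zero, List.foldl_nil, Nat.not_lt_zero, if_false]
    exact (pvMapRangeGetD n r hr).symm
  | succ t ih =>
    intro ht
    have ht' : t < n := ht
    have hn0 : 0 < n := by omega
    rw [List.range_succ, List.foldl_append, ih (Nat.le_of_lt ht'), List.foldl_cons,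
      List.foldl_nil]
    have hktn : (i + t) % n < n := Nat.mod_lt _ hn0
    have hc1 : ((i + t) % n + n - i) % n = t := pvCancel1 n i t hi ht'
    rw [pvGetDMapRange n _ _ hktn, hc1, if_neg (lt_irrefl t), pvSetMapRange n _ _ hktn]
    apply List.map_congr_left
    intro k hkmem
    have hk : k < n := List.mem_range.mp hkmem
    by_cases hkeq : k = (i + t) % n
    · subst hkeq
      simp [hc1]
    · rw [if_neg hkeq]
      have hne : (k + n - i) % n ≠ t := fun h => hkeq ((pvCancel2 n i t k hi ht' hk).mp h)
      have hiff : ((k + n - i) % n < t + 1) ↔ ((k + n - i) % n < t) := by omega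
      simp only [hiff]

-- A's full double loop equals the gather form, reduced
theorem pvOutA (p1 p2 : Nat → Int) (m : Int) (n : Nat) :
    ∀ i, i ≤ n →
    (List.range i).foldl (fun r i' =>
        (List.range n).foldl (fun r j =>
          r.set ((i' + j) % n) (((r.getD ((i' + j) % n) 0 + p1 i' * p2 j).fmod m))) r)
      (List.replicate n (0 : Int))
      = (List.range n).map (fun k =>
          (((List.range i).map (fun i' => p1 i' * p2 ((k + n - i') % n))).sum).fmod m) := by
  intro i
  induction i with
  | zero =>
    intro _
    simp [List.map_const', Int.zero_fmod]
  | succ i ih =>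
    intro hi1
    have hi : i < n := hi1
    rw [List.range_succ, List.foldl_append, ih (Nat.le_of_lt hi)]
    simp only [List.foldl_cons, List.foldl_nil]
    rw [pvRowA p1 p2 m n i hi _ (by simp) n (Nat.le_refl n)]
    · apply List.map_congr_left
      intro k hkmem
      have hk : k < n := List.mem_range.mp hkmem
      have hcond : (k + n - i) % n < n := Nat.mod_lt _ (by omega)
      simp only [hcond, if_pos]
      rw [pvGetDMapRange n _ k hk, pvFmodAddLeft]
      rw [List.map_append, List.sum_append]
      simp

-- ---- B side: Horner packing ----
theorem pvHorner (b : Int) (l : List Int) :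
    l.reverse.foldl (fun x c => x * b + c) 0
      = ∑ i ∈ Finset.range l.length, l.getD i 0 * b ^ i := by
  rw [List.foldl_reverse]
  induction l with
  | nil => simp
  | cons a t ih =>
    rw [List.foldr_cons, ih]
    simp only [List.length_cons]
    rw [Finset.sum_range_succ']
    have h1 : ∀ i : Nat, (a :: t).getD (i + 1) 0 * b ^ (i + 1)
        = (t.getD i 0 * b ^ i) * b := by
      intro i; simp [pow_succ]; ring
    simp only [h1]
    rw [← Finset.sum_mul]
    simp [add_comm]

-- ---- B side: regrouping the product of packed values by digit ----
theorem pvRegroup (b : Int) (n : Nat) (hn : 0 < n) (f g : Nat → Int) :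
    (∑ i ∈ Finset.range n, f i * b ^ i) * (∑ j ∈ Finset.range n, g j * b ^ j)
      = ∑ t ∈ Finset.range (2 * n - 1),
          (∑ i ∈ Finset.range n, if i ≤ t ∧ t - i < n then f i * g (t - i) else 0) * b ^ t := by
  have hR : ∀ t, (∑ i ∈ Finset.range n, if i ≤ t ∧ t - i < n then f i * g (t - i) else 0) * b ^ t
      = ∑ i ∈ Finset.range n, (if i ≤ t ∧ t - i < n then f i * g (t - i) * b ^ t else 0) := by
    intro t
    rw [Finset.sum_mul]
    apply Finset.sum_congr rfl
    intro i _
    by_cases h : i ≤ t ∧ t - i < n <;> simp [h]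
  have key : ∀ i ∈ Finset.range n,
      (∑ j ∈ Finset.range n, f i * b ^ i * (g j * b ^ j))
        = ∑ t ∈ Finset.range (2 * n - 1),
            (if i ≤ t ∧ t - i < n then f i * g (t - i) * b ^ t else 0) := by
    intro i hi
    have hin : i < n := Finset.mem_range.mp hi
    have hfilter : (Finset.range (2 * n - 1)).filter (fun t => i ≤ t ∧ t - i < n)
        = (Finset.range n).image (fun j => i + j) := by
      ext t
      simp only [Finset.mem_filter, Finset.mem_range, Finset.mem_image]
      constructor
      · rintro ⟨_, h2, h3⟩; exact ⟨t - i, h3, by omega⟩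
      · rintro ⟨j, hj, rfl⟩; omega
    rw [← Finset.sum_filter, hfilter,
      Finset.sum_image (by intro x _ y _ h; simpa using h)]
    apply Finset.sum_congr rfl
    intro j _
    have hj : i + j - i = j := by omega
    rw [hj, pow_add]
    ring
  rw [Finset.sum_mul_sum, Finset.sum_congr rfl key, Finset.sum_comm]
  apply Finset.sum_congr rfl
  intro t _
  exact (hR t).symm

-- ---- B side: digit decoding by repeated divmod ----
theorem pvDecode (b : Int) (hb : 0 < b) :
    ∀ (L : Nat) (c : Nat → Int) (N : Int) (acc : List Int),
    (∀ t, 0 ≤ c t ∧ c t < b) →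
    N = ∑ t ∈ Finset.range L, c t * b ^ t →
    (List.range L).foldl (fun (st : Int × List Int) (_ : Nat) =>
        (st.1.fdiv b, st.2 ++ [st.1.fmod b])) (N, acc)
      = (0, acc ++ (List.range L).map c) := by
  intro L
  induction L with
  | zero => intro c N acc _ hN; simp at hN; simp [hN]
  | succ L ih =>
    intro c N acc hc hN
    have hstep : ∀ t : Nat, c (t + 1) * b ^ (t + 1) = b * (c (t + 1) * b ^ t) := by
      intro t; rw [pow_succ]; ring
    have hS : N = c 0 + b * ∑ t ∈ Finset.range L, c (t + 1) * b ^ t := by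
      rw [hN, Finset.sum_range_succ']
      simp only [hstep, pow_zero, mul_one]
      rw [← Finset.mul_sum]
      ring
    have hmod : N.fmod b = c 0 := by
      rw [pvFmodPos _ _ hb, hS, Int.add_mul_emod_self_left,
        Int.emod_eq_of_lt (hc 0).1 (hc 0).2]
    have hdiv : N.fdiv b = ∑ t ∈ Finset.range L, c (t + 1) * b ^ t := by
      rw [pvFdivPos _ _ hb, hS, Int.add_mul_ediv_left _ _ (by omega),
        Int.ediv_eq_zero_of_lt (hc 0).1 (hc 0).2, zero_add]
    rw [List.range_succ_eq_map, List.foldl_cons, List.foldl_map]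
    simp only []
    rw [hmod, hdiv]
    rw [ih (fun t => c (t + 1)) _ (acc ++ [c 0]) (fun t => hc (t + 1)) rfl]
    simp [List.map_map, Function.comp_def, Nat.succ_eq_add_one]

-- ===== VERDICT (by name: the statement is the Claim_ definition above) =====
theorem polynomial_multiply_py_spec : Claim_equal_polynomial_multiply_py := by
  intro poly1 poly2 modulus _ hpre
  unfold Spec_polynomial_multiply_py polynomial_multiply_py polynomial_multiply_py_alt
  set n := poly1.length with hn
  set p1 : Nat → Int := fun i => poly1.getD i 0 with hp1
  set p2 : Nat → Int := fun j => poly2.getD j 0 with hp2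
  rcases Nat.eq_zero_or_pos n with h0 | hpos
  · simp [h0]
  have hnne : poly1 ≠ [] := by
    intro h; rw [h] at hn; simp at hn; omega
  have hm : modulus ≠ 0 := by
    rcases hpre.2 with h | h
    · exact h
    · exact absurd h hnne
  rw [if_neg (by omega)]
  -- abbreviations for B's data
  set M : Int := |modulus| with hM
  have hM0 : 0 < M := by simp [hM]; omega
  set r1f : Nat → Int := fun i => (p1 i).fmod M with hr1f
  set r2f : Nat → Int := fun j => (p2 j).fmod M with hr2f
  set b : Int := (n : Int) * (M - 1) * (M - 1) + 1 with hbdef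
  have hb : 0 < b := by
    have h1 : (0 : Int) ≤ (n : Int) * ((M - 1) * (M - 1)) :=
      mul_nonneg (by positivity) (mul_self_nonneg _)
    rw [hbdef]; nlinarith
  -- residue bounds
  have hrb1 : ∀ i, 0 ≤ r1f i ∧ r1f i < M := by
    intro i
    rw [hr1f]; simp only []
    rw [pvFmodPos _ _ hM0]
    exact ⟨Int.emod_nonneg _ (by omega), Int.emod_lt_of_pos _ hM0⟩
  have hrb2 : ∀ j, 0 ≤ r2f j ∧ r2f j < M := by
    intro j
    rw [hr2f]; simp only []
    rw [pvFmodPos _ _ hM0]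
    exact ⟨Int.emod_nonneg _ (by omega), Int.emod_lt_of_pos _ hM0⟩
  -- the convolution digits
  set cfun : Nat → Int := fun t =>
    ∑ i ∈ Finset.range n, if i ≤ t ∧ t - i < n then r1f i * r2f (t - i) else 0 with hcfun
  have hcb : ∀ t, 0 ≤ cfun t ∧ cfun t < b := by
    intro t
    constructor
    · apply Finset.sum_nonneg
      intro i _
      by_cases h : i ≤ t ∧ t - i < n
      · simp only [h]
        exact mul_nonneg (hrb1 i).1 (hrb2 _).1
      · simp [h]
    · have hle : cfun t ≤ ∑ _i ∈ Finset.range n, (M - 1) * (M - 1) := by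
        apply Finset.sum_le_sum
        intro i _
        by_cases h : i ≤ t ∧ t - i < n
        · simp only [h]
          have h1 := hrb1 i
          have h2 := hrb2 (t - i)
          apply mul_le_mul (by omega) (by omega) h2.1 (by omega)
        · simp only [h, if_false]
          exact mul_self_nonneg (M - 1)
      rw [Finset.sum_const, Finset.card_range, nsmul_eq_mul] at hle
      rw [hbdef]
      calc cfun t ≤ (n : Int) * ((M - 1) * (M - 1)) := hle
        _ < (n : Int) * (M - 1) * (M - 1) + 1 := by rw [mul_assoc]; omega
  -- normalise pyRange/pyGetD on both sides
  simp only [PySem.Int.mod, PySem.Int.floordiv, PySem.List.pyRange_zero_natCast,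
    List.foldl_map, List.map_map, Function.comp_def, PySem.List.pyGetD_natCast]
  -- A side: normalise the loop body to the Nat form of pvOutA
  have hA : ∀ (r : List Int) (i : Nat),
      (List.range n).foldl (fun r j =>
        r.set ((((i : Int) + (j : Int)).fmod (n : Int)).toNat)
          ((PySem.List.pyGetD r (((i : Int) + (j : Int)).fmod (n : Int)) 0 +
            poly1.getD i 0 * poly2.getD j 0).fmod modulus)) r
      = (List.range n).foldl (fun r j =>
          r.set ((i + j) % n) (((r.getD ((i + j) % n) 0 + p1 i * p2 j).fmod modulus))) r := by
    intro r i
    apply PySem.List.foldl_congr_mem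
    intro r' j _
    have hcast : (i : Int) + (j : Int) = ((i + j : Nat) : Int) := by push_cast; ring
    have hmod : ((i + j : Nat) : Int).fmod (n : Int) = (((i + j) % n : Nat) : Int) := by
      have := PySem.Int.mod_natCast (i + j) n
      simpa [PySem.Int.mod] using this
    rw [hcast, hmod, Int.toNat_natCast]
    simp only [PySem.List.pyGetD_natCast, hp1, hp2]
  rw [PySem.List.foldl_congr_mem _ _ _ _ (fun r i _ => hA r i)]
  rw [pvOutA p1 p2 modulus n n (Nat.le_refl n)]
  -- B side: identify the packed integers
  have hlistR : ∀ (pf : Nat → Int),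
      ((List.range n).map (fun i => (pf i).fmod M)).reverse.foldl (fun x c => x * b + c) 0
        = ∑ i ∈ Finset.range n, (pf i).fmod M * b ^ i := by
    intro pf
    rw [pvHorner]
    simp only [List.length_map, List.length_range]
    apply Finset.sum_congr rfl
    intro i hi
    rw [pvGetDMapRange n _ i (Finset.mem_range.mp hi)]
  rw [hlistR p1, hlistR p2]
  -- the product is the digit expansion of cfun
  have hprod : (∑ i ∈ Finset.range n, (p1 i).fmod M * b ^ i) *
      (∑ j ∈ Finset.range n, (p2 j).fmod M * b ^ j)
      = ∑ t ∈ Finset.range (2 * n - 1), cfun t * b ^ t := by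
    exact pvRegroup b n hpos r1f r2f
  -- decode
  have hcastL : 2 * (n : Int) - 1 = ((2 * n - 1 : Nat) : Int) := by omega
  rw [hcastL, PySem.List.pyRange_zero_natCast, List.foldl_map]
  rw [show (fun (st : Int × List Int) (x : Nat) =>
      (st.1.fdiv b, st.2 ++ [st.1.fmod b])) = (fun st (_ : Nat) =>
      (st.1.fdiv b, st.2 ++ [st.1.fmod b])) from rfl]
  rw [pvDecode b hb (2 * n - 1) cfun _ [] hcb hprod]
  simp only [List.nil_append]
  -- final per-coefficient comparison
  apply List.map_congr_left
  intro k hkmem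
  have hk : k < n := List.mem_range.mp hkmem
  -- B's two conv lookups
  have hget1 : ((List.range (2 * n - 1)).map cfun).getD k 0 = cfun k :=
    pvGetDMapRange _ _ _ (by omega)
  have hcast2 : (k : Int) + (n : Int) = ((k + n : Nat) : Int) := by push_cast; ring
  have hB : (if (k : Int) + (n : Int) < ((2 * n - 1 : Nat) : Int) then
        PySem.List.pyGetD ((List.range (2 * n - 1)).map cfun) ((k : Int) + (n : Int)) 0 else 0)
      = cfun (k + n) := by
    by_cases hlt : k + n < 2 * n - 1
    · rw [if_pos (by omega), hcast2, PySem.List.pyGetD_natCast,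
        pvGetDMapRange _ _ _ hlt]
    · rw [if_neg (by omega)]
      have hzero : cfun (k + n) = 0 := by
        rw [hcfun]
        apply Finset.sum_eq_zero
        intro i hi
        have hin : i < n := Finset.mem_range.mp hi
        rw [if_neg (by omega)]
      exact hzero.symm
  rw [hget1, hB]
  -- wrap identity at residue level, then congruence back to p1/p2
  rw [pvSumMapRange]
  have hwrap : cfun k + cfun (k + n)
      = ∑ i ∈ Finset.range n, r1f i * r2f ((k + n - i) % n) := by
    rw [hcfun]
    simp only []
    rw [← Finset.sum_add_distrib]
    apply Finset.sum_congr rfl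
    intro i hi
    have hin : i < n := Finset.mem_range.mp hi
    by_cases hik : i ≤ k
    · rw [if_pos (by omega), if_neg (by omega)]
      have : (k + n - i) % n = k - i := by
        have h1 : k + n - i = (k - i) + n := by omega
        rw [h1, Nat.add_mod_right, Nat.mod_eq_of_lt (by omega)]
      rw [this, add_zero]
    · rw [if_neg (by omega), if_pos (by omega)]
      have : (k + n - i) % n = k + n - i := Nat.mod_eq_of_lt (by omega)
      rw [this, zero_add]
  rw [hwrap]
  -- congruence: residues may replace the original coefficients under fmod modulus
  apply pvFmodCongr
  rw [← Finset.sum_sub_distrib]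
  apply Finset.dvd_sum
  intro i _
  have hdM : modulus ∣ M := by
    rw [hM]
    exact (dvd_abs _ _).mpr dvd_rfl
  have hd1 : modulus ∣ (p1 i - r1f i) := by
    rw [hr1f]; simp only []
    rw [Int.fmod_def]
    have : p1 i - (p1 i - M * (p1 i).fdiv M) = M * (p1 i).fdiv M := by ring
    rw [this]
    exact hdM.mul_right _
  have hd2 : modulus ∣ (p2 ((k + n - i) % n) - r2f ((k + n - i) % n)) := by
    rw [hr2f]; simp only []
    rw [Int.fmod_def]
    have : p2 ((k + n - i) % n) - (p2 ((k + n - i) % n) - M * (p2 ((k + n - i) % n)).fdiv M)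
        = M * (p2 ((k + n - i) % n)).fdiv M := by ring
    rw [this]
    exact hdM.mul_right _
  have : p1 i * p2 ((k + n - i) % n) - r1f i * r2f ((k + n - i) % n)
      = (p1 i - r1f i) * p2 ((k + n - i) % n) + r1f i * (p2 ((k + n - i) % n) - r2f ((k + n - i) % n)) := by
    ring
  rw [this]
  exact dvd_add (hd1.mul_right _) (hd2.mul_left _)
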